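-- pv_equiv track=rewrite | github.com/dagster-io/erk | packages/erk-shared/src/erk_shared/gateway/github/pr_footer.py | extract_header_from_body
-- ===== SOURCE A (Python) =====
-- HEADER_PATTERNS = (
--     "**Plan:**",
--     "**Remotely executed:**",
-- )
--
-- def _scan_header_from_top(content: str) -> str:
--     """Scan from the top of content for header pattern lines (legacy format).
--
--     In the old format, header lines appeared at the top of the PR body
--     rather than just above the footer separator.
--     """
--     lines = content.split("\n")
--     header_lines: list[str] = []
--
--     for line in lines:
--         if not line.strip():
--             if header_lines:
--                 header_lines.append(line)
--             continue
--         if any(line.startswith(pattern) for pattern in HEADER_PATTERNS):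
--             header_lines.append(line)
--         else:
--             break
--
--     if not header_lines:
--         return ""
--
--     # Remove leading/trailing blank lines
--     while header_lines and not header_lines[0].strip():
--         header_lines.pop(0)
--     while header_lines and not header_lines[-1].strip():
--         header_lines.pop()
--
--     if header_lines:
--         return "\n".join(header_lines) + "\n\n"
--     return ""
--
-- def extract_header_from_body(body: str) -> str:
--     """Extract header lines from the PR body.
--
--     Header lines match known patterns like ``**Plan:** #123`` or
--     ``**Remotely executed:** [Run #...]``. They may appear either just
--     above the footer separator (new format) or at the top of the body
--     (legacy format).
--
--     The function tries the new bottom position first, then falls back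
--     to scanning from the top for backward compatibility with existing PRs.
--
--     Args:
--         body: Full PR body content
--
--     Returns:
--         Header content (including trailing newlines) or empty string if no header
--     """
--     if not body:
--         return ""
--
--     # Remove footer first
--     parts = body.rsplit("\n---\n", 1)
--     content_without_footer = parts[0]
--
--     # Scan from the end of the content for header pattern lines (new format)
--     lines = content_without_footer.split("\n")
--     header_lines: list[str] = []
--
--     for line in reversed(lines):
--         if not line.strip():
--             if header_lines:
--                 header_lines.append(line)
--             continue
--         if any(line.startswith(pattern) for pattern in HEADER_PATTERNS):
--             header_lines.append(line)
--         else: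
--             break
--
--     if not header_lines:
--         # Fall back to scanning from top (legacy format)
--         return _scan_header_from_top(content_without_footer)
--
--     # Reverse to restore original order
--     header_lines.reverse()
--
--     # Remove leading/trailing blank lines
--     while header_lines and not header_lines[0].strip():
--         header_lines.pop(0)
--     while header_lines and not header_lines[-1].strip():
--         header_lines.pop()
--
--     if header_lines:
--         return "\n".join(header_lines) + "\n\n"
--     return ""
-- ===== SOURCE B (Python) =====
-- HEADER_PATTERNS = (
--     "**Plan:**",
--     "**Remotely executed:**",
-- )
--
--
-- def _is_blank(line):
--     return not line.strip()
--
--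
-- def _is_header(line):
--     return line.startswith(HEADER_PATTERNS)
--
--
-- def _trim_blanks(block):
--     """Strip leading and trailing blank lines (recursively)."""
--     if block and _is_blank(block[0]):
--         return _trim_blanks(block[1:])
--     if block and _is_blank(block[-1]):
--         return _trim_blanks(block[:-1])
--     return block
--
--
-- def extract_header_from_body(body: str) -> str:
--     if not body:
--         return ""
--
--     lines = body.rsplit("\n---\n", 1)[0].split("\n")
--
--     # Forward pass: start ends up just past the last non-blank, non-header line.
--     start = 0
--     for i, line in enumerate(lines):
--         if not _is_blank(line) and not _is_header(line):
--             start = i + 1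
--
--     block = _trim_blanks(lines[start:])
--     if block:
--         return "\n".join(block) + "\n\n"
--
--     # Legacy format: header block at the top of the body.
--     end = 0
--     for i, line in enumerate(lines[:start]):
--         if _is_blank(line):
--             continue
--         if _is_header(line):
--             end = i + 1
--         else:
--             break
--
--     block = _trim_blanks(lines[:end])
--     return "\n".join(block) + "\n\n" if block else ""
-- ===== Notes on version B (the rewrite author's own statement) =====
-- stated objective: alternative
-- what changed: The reversed scan that accumulates header lines into a list (then reverses and pops blanks from both ends) is replaced by a single forward pass that maintains a reset pointer `start` past the last non-blank non-header line, after which the block is obtained by slicing and a recursive blank-trimmer; the legacy top scan likewise computes an end index instead of accumulating a list.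
import Mathlib
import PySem

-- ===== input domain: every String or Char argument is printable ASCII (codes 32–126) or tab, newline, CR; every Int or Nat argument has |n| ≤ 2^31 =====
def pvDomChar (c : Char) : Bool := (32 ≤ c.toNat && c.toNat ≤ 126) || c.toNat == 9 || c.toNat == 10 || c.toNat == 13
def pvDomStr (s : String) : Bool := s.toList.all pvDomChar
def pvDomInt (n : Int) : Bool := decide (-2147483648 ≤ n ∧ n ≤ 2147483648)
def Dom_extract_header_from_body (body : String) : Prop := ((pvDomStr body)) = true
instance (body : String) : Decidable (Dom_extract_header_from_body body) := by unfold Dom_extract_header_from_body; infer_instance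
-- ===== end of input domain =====

-- B replaces A's reversed-scan-with-accumulator-and-pop-loops by an index-based forward pass
-- (a reset pointer, then slicing and one recursive blank-trimmer); objective: alternative decomposition.
-- Both programs work line-wise; lines are kept as List Char (PySem.Chars primitives are exact there).

-- ===== PORT A =====
-- module constant HEADER_PATTERNS (shared by both Pythons)
def pvHeaderPatterns : List (List Char) := ["**Plan:**".toList, "**Remotely executed:**".toList]

-- A's `for line in reversed(lines): …` loop (break returns the accumulator)
def pvRevScanA : List (List Char) → List (List Char) → List (List Char)
  | [], acc => acc
  | line :: rest, acc =>
    if PySem.Chars.strip line == [] then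
      (if acc == [] then pvRevScanA rest acc else pvRevScanA rest (acc ++ [line]))
    else if pvHeaderPatterns.any (fun p => PySem.Chars.startswith line p) then
      pvRevScanA rest (acc ++ [line])
    else acc

-- A's `for line in lines:` loop in _scan_header_from_top (same body, forward order)
def pvTopScanA : List (List Char) → List (List Char) → List (List Char)
  | [], acc => acc
  | line :: rest, acc =>
    if PySem.Chars.strip line == [] then
      (if acc == [] then pvTopScanA rest acc else pvTopScanA rest (acc ++ [line]))
    else if pvHeaderPatterns.any (fun p => PySem.Chars.startswith line p) then
      pvTopScanA rest (acc ++ [line])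
    else acc

-- A's `while header_lines and not header_lines[0].strip(): header_lines.pop(0)`
def pvPopLeadA : List (List Char) → List (List Char)
  | [] => []
  | l :: ls => if PySem.Chars.strip l == [] then pvPopLeadA ls else l :: ls

-- A's `while header_lines and not header_lines[-1].strip(): header_lines.pop()`
def pvPopTrailA (xs : List (List Char)) : List (List Char) :=
  match h : xs.getLast? with
  | none => xs
  | some l =>
    if PySem.Chars.strip l == [] then pvPopTrailA xs.dropLast else xs
termination_by xs.length
decreasing_by
  cases xs with
  | nil => simp at h
  | cons a as => simp

def pv_scan_header_from_top (content : List Char) : String :=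
  let lines := PySem.Chars.splitOn content "\n".toList
  let headerLines := pvTopScanA lines []
  if headerLines == [] then ""
  else
    let headerLines := pvPopTrailA (pvPopLeadA headerLines)
    if headerLines ≠ [] then String.mk (PySem.Chars.join "\n".toList headerLines ++ "\n\n".toList)
    else ""

def extract_header_from_body (body : String) : String :=
  let cs := body.toList
  if cs == [] then ""
  else
    -- body.rsplit("\n---\n", 1)[0] = body[:i] at the last occurrence i of the separator, else body (exact)
    let i := PySem.Chars.rfind cs "\n---\n".toList
    let content := if i == -1 then cs else PySem.Chars.slice cs none (some i)
    let lines := PySem.Chars.splitOn content "\n".toList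
    let headerLines := pvRevScanA lines.reverse []
    if headerLines == [] then pv_scan_header_from_top content
    else
      let headerLines := pvPopTrailA (pvPopLeadA headerLines.reverse)
      if headerLines ≠ [] then String.mk (PySem.Chars.join "\n".toList headerLines ++ "\n\n".toList)
      else ""

-- ===== PORT B =====
def pvBlankB (line : List Char) : Bool := PySem.Chars.strip line == []

def pvHeaderB (line : List Char) : Bool := pvHeaderPatterns.any (fun p => PySem.Chars.startswith line p)

-- B's recursive _trim_blanks
def pvTrimB (block : List (List Char)) : List (List Char) :=
  if block ≠ [] ∧ pvBlankB block.headI then pvTrimB block.tail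
  else if block ≠ [] ∧ pvBlankB block.getLastI then pvTrimB block.dropLast
  else block
termination_by block.length
decreasing_by
  · cases block with
    | nil => simp_all
    | cons a as => simp
  · cases block with
    | nil => simp_all
    | cons a as => simp [List.length_dropLast]

-- B's legacy-scan loop: `for i, line in enumerate(...): … end = i + 1 … break`
def pvTopEndB : List (Int × List Char) → Int → Int
  | [], e => e
  | (i, line) :: rest, e =>
    if pvBlankB line then pvTopEndB rest e
    else if pvHeaderB line then pvTopEndB rest (i + 1)
    else e

def extract_header_from_body_alt (body : String) : String :=
  let cs := body.toList
  if cs == [] then ""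
  else
    -- body.rsplit("\n---\n", 1)[0] = body[:i] at the last occurrence i of the separator, else body (exact)
    let i := PySem.Chars.rfind cs "\n---\n".toList
    let content := if i == -1 then cs else PySem.Chars.slice cs none (some i)
    let lines := PySem.Chars.splitOn content "\n".toList
    -- forward pass: start ends up just past the last non-blank, non-header line
    let start := (PySem.List.enumerate lines).foldl
      (fun s p => if !pvBlankB p.2 && !pvHeaderB p.2 then p.1 + 1 else s) 0
    let block := pvTrimB (PySem.List.slice lines (some start) none)
    if block ≠ [] then String.mk (PySem.Chars.join "\n".toList block ++ "\n\n".toList)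
    else
      let e := pvTopEndB (PySem.List.enumerate (PySem.List.slice lines none (some start))) 0
      let block := pvTrimB (PySem.List.slice lines none (some e))
      if block ≠ [] then String.mk (PySem.Chars.join "\n".toList block ++ "\n\n".toList)
      else ""

-- ===== PRECONDITION & SPEC =====
def Spec_extract_header_from_body (body : String) (out : String) : Prop := out = extract_header_from_body_alt body
instance (body : String) (out : String) : Decidable (Spec_extract_header_from_body body out) := by unfold Spec_extract_header_from_body; infer_instance

-- ===== CLAIM (what is proved, stated in full; the proofs are below) =====
def Claim_equal_extract_header_from_body : Prop := ∀ (body : String), Dom_extract_header_from_body body → Spec_extract_header_from_body body (extract_header_from_body body)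

-- ===== LEMMAS AND PROOFS =====

-- proof-only abbreviations
def pvNotOther (l : List Char) : Bool := pvBlankB l || pvHeaderB l
def pvU (z : List (List Char)) : List (List Char) := z.dropWhile pvBlankB
def pvT (z : List (List Char)) : List (List Char) := (pvU z.reverse).reverse
def pvStart (l : List (List Char)) : Int :=
  (PySem.List.enumerate l).foldl (fun s p => if !pvBlankB p.2 && !pvHeaderB p.2 then p.1 + 1 else s) 0
-- index (within takeWhile pvNotOther m) of the last effective header line, as scanned from the top
def pvLastHdr : List (List Char) → Option Nat
  | [] => none
  | x :: t =>
    if pvBlankB x then (pvLastHdr t).map (· + 1)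
    else if pvHeaderB x then some ((pvLastHdr t).map (· + 1) |>.getD 0)
    else none

theorem pvU_nil_iff (z : List (List Char)) : pvU z = [] ↔ ∀ x ∈ z, pvBlankB x = true := by
  simp [pvU, List.dropWhile_eq_nil_iff]

theorem pvT_nil_iff (z : List (List Char)) : pvT z = [] ↔ ∀ x ∈ z, pvBlankB x = true := by
  simp [pvT, pvU, List.dropWhile_eq_nil_iff]

theorem pvU_append_of_ne (z w : List (List Char)) (h : pvU z ≠ []) : pvU (z ++ w) = pvU z ++ w := by
  simp only [pvU, List.dropWhile_append]
  rw [if_neg]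
  simp only [List.isEmpty_iff]
  simpa only [pvU] using h

theorem pvT_cons (x : List Char) (t : List (List Char)) (h : pvBlankB x = false ∨ pvU t.reverse ≠ []) :
    pvT (x :: t) = x :: pvT t := by
  by_cases hu : pvU t.reverse = []
  · have hx : pvBlankB x = false := by
      cases h with
      | inl h => exact h
      | inr h => exact absurd hu h
    simp only [pvT, List.reverse_cons, pvU, List.dropWhile_append]
    rw [if_pos (by simp only [List.isEmpty_iff]; simpa only [pvU] using hu)]
    simp only [pvU] at hu
    simp [List.dropWhile, hx, hu]
  · simp only [pvT, List.reverse_cons]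
    rw [pvU_append_of_ne _ _ hu]
    simp

theorem pvT_cons_all_blank (x : List Char) (t : List (List Char))
    (hb : pvBlankB x = true) (h : ∀ y ∈ t, pvBlankB y = true) : pvT (x :: t) = [] := by
  refine (pvT_nil_iff _).mpr ?_
  intro y hy
  rcases List.mem_cons.mp hy with rfl | hy
  · exact hb
  · exact h y hy

theorem pvU_idem (z : List (List Char)) : pvU (pvU z) = pvU z := by
  simp [pvU, List.dropWhile_idempotent]

theorem pvT_idem (z : List (List Char)) : pvT (pvT z) = pvT z := by
  simp only [pvT, List.reverse_reverse, pvU_idem]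

theorem pvUT_comm (z : List (List Char)) : pvU (pvT z) = pvT (pvU z) := by
  induction z with
  | nil => rfl
  | cons x t ih =>
    by_cases hx : pvBlankB x = true
    · by_cases hall : ∀ y ∈ t, pvBlankB y = true
      · rw [pvT_cons_all_blank x t hx hall]
        have ht : pvU t = [] := (pvU_nil_iff t).mpr hall
        have : pvU (x :: t) = [] := (pvU_nil_iff _).mpr (fun y hy => by
          rcases List.mem_cons.mp hy with rfl | hy
          · exact hx
          · exact hall y hy)
        rw [this]
        rfl
      · have hne : pvU t.reverse ≠ [] := by
          intro hc
          exact hall (fun y hy => (pvU_nil_iff t.reverse).mp hc y (List.mem_reverse.mpr hy))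
        rw [pvT_cons x t (Or.inr hne)]
        have hstep : pvU (x :: pvT t) = pvU (pvT t) := by simp [pvU, List.dropWhile, hx]
        have hstep2 : pvU (x :: t) = pvU t := by simp [pvU, List.dropWhile, hx]
        rw [hstep, ih, hstep2]
    · have hx' : pvBlankB x = false := by simpa using hx
      rw [pvT_cons x t (Or.inl hx')]
      have h1 : pvU (x :: pvT t) = x :: pvT t := by simp [pvU, List.dropWhile, hx']
      have h2 : pvU (x :: t) = x :: t := by simp [pvU, List.dropWhile, hx']
      rw [h1, h2, pvT_cons x t (Or.inl hx')]

theorem pvT_of_pvU_reverse (p : List (List Char)) : pvT p.reverse = (pvU p).reverse := by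
  simp [pvT]

-- pvRevScanA characterization
theorem pvRevScanA_ne (r acc : List (List Char)) (h : acc ≠ []) :
    pvRevScanA r acc = acc ++ r.takeWhile pvNotOther := by
  induction r generalizing acc with
  | nil => simp [pvRevScanA]
  | cons line rest ih =>
    have hacc : (acc == []) = false := by simpa using h
    by_cases hb : pvBlankB line = true
    · have hno : pvNotOther line = true := by simp [pvNotOther, hb]
      simp only [pvRevScanA, pvBlankB] at *
      simp only [hb, if_true, hacc, Bool.false_eq_true, if_false, List.takeWhile_cons, hno,
        ih (acc ++ [line]) (by simp), List.append_assoc, List.singleton_append]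
    · have hb' : (PySem.Chars.strip line == []) = false := by simpa [pvBlankB] using hb
      by_cases hh : pvHeaderB line = true
      · have hno : pvNotOther line = true := by simp [pvNotOther, hh]
        simp only [pvRevScanA, pvHeaderB] at *
        simp only [hb', Bool.false_eq_true, if_false, hh, if_true, List.takeWhile_cons, hno,
          ih (acc ++ [line]) (by simp), List.append_assoc, List.singleton_append]
      · have hh' : (pvHeaderPatterns.any (fun p => PySem.Chars.startswith line p)) = false := by
          simpa [pvHeaderB] using hh
        have hno : pvNotOther line = false := by
          have h1 : pvBlankB line = false := by simpa [pvBlankB] using hb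
          have h2 : pvHeaderB line = false := by simpa [pvHeaderB] using hh
          simp [pvNotOther, h1, h2]
        simp only [pvRevScanA, List.takeWhile_cons, hno, hb', hh', Bool.false_eq_true, if_false]
        simp

theorem pvRevScanA_nil (r : List (List Char)) :
    pvRevScanA r [] = pvU (r.takeWhile pvNotOther) := by
  induction r with
  | nil => rfl
  | cons line rest ih =>
    by_cases hb : pvBlankB line = true
    · have hno : pvNotOther line = true := by simp [pvNotOther, hb]
      have hb'' : (PySem.Chars.strip line == []) = true := hb
      simp only [pvRevScanA, hb'', if_true, List.takeWhile_cons, hno]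
      simp only [List.nil_append, show (([] : List (List Char)) == []) = true from rfl, if_true, ih]
      simp [pvU, List.dropWhile, hb]
    · have hb' : (PySem.Chars.strip line == []) = false := by simpa [pvBlankB] using hb
      by_cases hh : pvHeaderB line = true
      · have hno : pvNotOther line = true := by simp [pvNotOther, hh]
        have hh'' : (pvHeaderPatterns.any (fun p => PySem.Chars.startswith line p)) = true := hh
        simp only [pvRevScanA, hb', Bool.false_eq_true, if_false, hh'', if_true,
          List.takeWhile_cons, hno, List.nil_append]
        rw [pvRevScanA_ne rest [line] (by simp)]
        have hbf : pvBlankB line = false := by simpa [pvBlankB] using hb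
        simp [pvU, List.dropWhile, hbf]
      · have hh' : (pvHeaderPatterns.any (fun p => PySem.Chars.startswith line p)) = false := by
          simpa [pvHeaderB] using hh
        have hno : pvNotOther line = false := by
          simp only [pvNotOther, Bool.or_eq_false_iff]
          exact ⟨by simpa [pvBlankB] using hb, by simpa [pvHeaderB] using hh⟩
        simp only [pvRevScanA, hb', hh', Bool.false_eq_true, if_false, List.takeWhile_cons, hno]
        rfl

theorem pvTopScanA_eq (r acc : List (List Char)) : pvTopScanA r acc = pvRevScanA r acc := by
  induction r generalizing acc with
  | nil => rfl
  | cons line rest ih =>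
    simp only [pvTopScanA, pvRevScanA]
    split_ifs <;> simp [ih]

theorem pvPopLeadA_eq (z : List (List Char)) : pvPopLeadA z = pvU z := by
  induction z with
  | nil => rfl
  | cons l ls ih =>
    simp only [pvPopLeadA, pvU, List.dropWhile]
    by_cases hb : pvBlankB l = true
    · have hb'' : (PySem.Chars.strip l == []) = true := hb
      simp only [hb'', if_true, hb]
      exact ih
    · have hb' : (PySem.Chars.strip l == []) = false := by simpa [pvBlankB] using hb
      simp [hb', show pvBlankB l = false from hb']

theorem pvPopTrailA_eq (z : List (List Char)) : pvPopTrailA z = pvT z := by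
  induction z using List.reverseRecOn with
  | nil => rw [pvPopTrailA]; rfl
  | append_singleton l a ih =>
    rw [pvPopTrailA.eq_def]
    rw [show (l ++ [a]).getLast? = some a from by simp]
    dsimp only
    by_cases hb : pvBlankB a = true
    · rw [if_pos (show (PySem.Chars.strip a == []) = true from hb), List.dropLast_concat, ih]
      simp [pvT, pvU, List.dropWhile, hb]
    · have hb' : (PySem.Chars.strip a == []) = false := by simpa [pvBlankB] using hb
      rw [if_neg (by simp [hb'])]
      simp [pvT, pvU, List.dropWhile, show pvBlankB a = false from hb']

theorem pvT_concat_blank (w : List (List Char)) (a : List Char) (hb : pvBlankB a = true) :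
    pvT (w ++ [a]) = pvT w := by
  simp [pvT, pvU, List.reverse_append, List.dropWhile, hb]

theorem pvT_concat_nonblank (w : List (List Char)) (a : List Char) (hb : pvBlankB a = false) :
    pvT (w ++ [a]) = w ++ [a] := by
  simp [pvT, pvU, List.reverse_append, List.dropWhile, hb]

theorem pvU_cons_blank (x : List Char) (t : List (List Char)) (hb : pvBlankB x = true) :
    pvU (x :: t) = pvU t := by
  simp [pvU, List.dropWhile, hb]

theorem pvU_cons_nonblank (x : List Char) (t : List (List Char)) (hb : pvBlankB x = false) :
    pvU (x :: t) = x :: t := by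
  simp [pvU, List.dropWhile, hb]

theorem pvTrimB_eq (z : List (List Char)) : pvTrimB z = pvT (pvU z) := by
  induction hn : z.length using Nat.strong_induction_on generalizing z with
  | _ n ih =>
  rw [pvTrimB.eq_def]
  split_ifs with h1 h2
  · obtain ⟨hne, hhd⟩ := h1
    cases z with
    | nil => exact absurd rfl hne
    | cons x t =>
      simp only [List.headI] at hhd
      simp only [List.tail_cons]
      rw [ih t.length (by subst hn; simp) t rfl, pvU_cons_blank x t hhd]
  · obtain ⟨hne, hlast⟩ := h2
    rcases z.eq_nil_or_concat with rfl | ⟨w, a, rfl⟩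
    · exact absurd rfl hne
    · simp only [List.concat_eq_append] at h1 hlast hn ⊢
      have ha : pvBlankB a = true := by
        simpa [List.getLastI_eq_getLast?, List.getLast?_concat] using hlast
      simp only [List.dropLast_concat]
      rw [ih w.length (by subst hn; simp) w rfl]
      -- head of z is non-blank (otherwise branch 1), so pvU keeps everything on both sides
      cases w with
      | nil =>
        simp only [List.nil_append] at h1 hlast ⊢
        simp only [List.getLastI_eq_getLast?] at hlast
        simp only [List.headI] at h1
        simp at hlast
        simp [hlast] at h1
      | cons x t =>
        have hx : pvBlankB x = false := by
          by_contra hc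
          exact h1 ⟨by simp, by simpa [List.headI] using (by simpa using hc : pvBlankB x = true)⟩
        rw [pvU_cons_nonblank x t hx]
        have : pvU ((x :: t) ++ [a]) = (x :: t) ++ [a] := by
          rw [List.cons_append, pvU_cons_nonblank _ _ hx]
        rw [this, pvT_concat_blank _ _ ha]
  · rcases z.eq_nil_or_concat with rfl | ⟨w, a, rfl⟩
    · rfl
    · simp only [List.concat_eq_append] at h1 h2 hn ⊢
      have ha : pvBlankB a = false := by
        by_contra hc
        exact h2 ⟨by simp, by
          simpa [List.getLastI_eq_getLast?, List.getLast?_concat] using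
            (by simpa using hc : pvBlankB a = true)⟩
      cases w with
      | nil =>
        simp only [List.nil_append]
        rw [pvU_cons_nonblank _ _ ha, show ([a] : List (List Char)) = [] ++ [a] from rfl,
          pvT_concat_nonblank _ _ ha]
      | cons x t =>
        have hx : pvBlankB x = false := by
          by_contra hc
          exact h1 ⟨by simp, by simpa [List.headI] using (by simpa using hc : pvBlankB x = true)⟩
        have : pvU ((x :: t) ++ [a]) = (x :: t) ++ [a] := by
          rw [List.cons_append, pvU_cons_nonblank _ _ hx]
        rw [this, pvT_concat_nonblank _ _ ha]

-- start-pointer characterization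
theorem pvStart_spec (l : List (List Char)) :
    0 ≤ pvStart l ∧ pvStart l ≤ l.length ∧
    l.drop (pvStart l).toNat = (l.reverse.takeWhile pvNotOther).reverse ∧
    (pvStart l ≠ 0 → ∃ h : (pvStart l).toNat - 1 < l.length,
      pvNotOther (l[(pvStart l).toNat - 1]) = false) := by
  induction l using List.reverseRecOn with
  | nil => refine ⟨le_refl 0, by simp [pvStart, PySem.List.enumerate], by simp [pvStart, PySem.List.enumerate], fun h => absurd rfl h⟩
  | append_singleton l a ih =>
    obtain ⟨ih0, ihle, ihdrop, ihlast⟩ := ih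
    have hstep : pvStart (l ++ [a]) =
        if !pvBlankB a && !pvHeaderB a then (l.length : Int) + 1 else pvStart l := by
      simp only [pvStart, PySem.List.enumerate_append, List.foldl_concat,
        show PySem.List.enumerate [a] (0 + l.length) = [((0 + l.length : Int), a)] from rfl]
      simp
    by_cases hno : pvNotOther a = true
    · have hcond : (!pvBlankB a && !pvHeaderB a) = false := by
        simp only [pvNotOther, Bool.or_eq_true] at hno
        rcases hno with h | h <;> simp [h]
      rw [hstep, if_neg (by simp [hcond])]
      refine ⟨ih0, by simp; omega, ?_, ?_⟩
      · rw [List.drop_append_of_le_length (by omega), ihdrop]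
        simp [List.takeWhile_cons, hno]
      · intro hne
        obtain ⟨hlt, hval⟩ := ihlast hne
        refine ⟨by simp; omega, ?_⟩
        rw [List.getElem_append_left hlt]
        exact hval
    · have hof : pvNotOther a = false := by simpa using hno
      obtain ⟨hbf, hhf⟩ : pvBlankB a = false ∧ pvHeaderB a = false := by
        simpa [pvNotOther, Bool.or_eq_false_iff] using hof
      have hcond : (!pvBlankB a && !pvHeaderB a) = true := by simp [hbf, hhf]
      rw [hstep, if_pos hcond]
      have htn : ((l.length : Int) + 1).toNat = l.length + 1 := by omega
      refine ⟨by omega, by simp, ?_, ?_⟩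
      · rw [htn, List.drop_eq_nil_of_le (by simp)]
        simp [List.reverse_append, List.takeWhile_cons, hof]
      · intro _
        refine ⟨by simp [htn], ?_⟩
        simp only [htn, Nat.add_sub_cancel]
        simpa [List.getElem_concat_length] using hof

-- pvTopEndB characterization
theorem pvTopEndB_spec (t : List (List Char)) (i e : Int) :
    pvTopEndB (PySem.List.enumerate t i) e =
      match pvLastHdr t with
      | none => e
      | some k => i + k + 1 := by
  induction t generalizing i e with
  | nil => rfl
  | cons x t ih =>
    rw [PySem.List.enumerate_cons]
    by_cases hb : pvBlankB x = true
    · simp only [pvTopEndB, hb, if_true, pvLastHdr]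
      rw [ih]
      cases hlh : pvLastHdr t <;> simp [hlh] <;> push_cast <;> ring
    · have hb' : pvBlankB x = false := by simpa using hb
      by_cases hh : pvHeaderB x = true
      · simp only [pvTopEndB, hb', Bool.false_eq_true, if_false, hh, if_true, pvLastHdr]
        rw [ih]
        cases hlh : pvLastHdr t <;> simp [hlh] <;> push_cast <;> ring
      · have hh' : pvHeaderB x = false := by simpa using hh
        simp only [pvTopEndB, hb', hh', Bool.false_eq_true, if_false, pvLastHdr]

theorem pvLastHdr_spec (m : List (List Char)) (k : Nat) (h : pvLastHdr m = some k) :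
    ∃ hk : k < (m.takeWhile pvNotOther).length,
      pvBlankB ((m.takeWhile pvNotOther)[k]) = false := by
  induction m generalizing k with
  | nil => simp [pvLastHdr] at h
  | cons x t ih =>
    by_cases hb : pvBlankB x = true
    · have hno : pvNotOther x = true := by simp [pvNotOther, hb]
      simp only [pvLastHdr, hb, if_true] at h
      cases hlh : pvLastHdr t with
      | none => simp [hlh] at h
      | some k' =>
        rw [hlh] at h
        simp only [Option.map_some] at h
        have hk := Option.some_inj.mp h
        subst hk
        obtain ⟨hk', hv⟩ := ih k' hlh
        refine ⟨by simp [List.takeWhile_cons, hno]; omega, ?_⟩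
        simpa [List.takeWhile_cons, hno] using hv
    · have hb' : pvBlankB x = false := by simpa using hb
      by_cases hh : pvHeaderB x = true
      · have hno : pvNotOther x = true := by simp [pvNotOther, hh]
        simp only [pvLastHdr, hb', Bool.false_eq_true, if_false, hh, if_true] at h
        cases hlh : pvLastHdr t with
        | none =>
          rw [hlh] at h
          simp only [Option.map_none, Option.getD_none] at h
          have hk := Option.some_inj.mp h
          subst hk
          refine ⟨by simp [List.takeWhile_cons, hno], by simpa [List.takeWhile_cons, hno] using hb'⟩
        | some k' =>
          rw [hlh] at h
          simp only [Option.map_some, Option.getD_some] at h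
          have hk := Option.some_inj.mp h
          subst hk
          obtain ⟨hk', hv⟩ := ih k' hlh
          refine ⟨by simp [List.takeWhile_cons, hno]; omega, ?_⟩
          simpa [List.takeWhile_cons, hno] using hv
      · have hh' : pvHeaderB x = false := by simpa using hh
        simp [pvLastHdr, hb', hh'] at h

-- if no effective header occurs before the first 'other' line, that whole prefix is blank
theorem pvLastHdr_none_all_blank (t : List (List Char)) (h : pvLastHdr t = none) :
    ∀ y ∈ t.takeWhile pvNotOther, pvBlankB y = true := by
  induction t with
  | nil => simp
  | cons z t ih =>
    intro y hy
    by_cases hb : pvBlankB z = true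
    · have hno : pvNotOther z = true := by simp [pvNotOther, hb]
      simp only [pvLastHdr, hb, if_true, Option.map_eq_none_iff] at h
      rw [List.takeWhile_cons, if_pos hno] at hy
      rcases List.mem_cons.mp hy with rfl | hy
      · exact hb
      · exact ih h y hy
    · have hb' : pvBlankB z = false := by simpa using hb
      by_cases hh : pvHeaderB z = true
      · simp [pvLastHdr, hb', hh] at h
      · have hh' : pvHeaderB z = false := by simpa using hh
        have hno : pvNotOther z = false := by simp [pvNotOther, hb', hh']
        rw [List.takeWhile_cons, if_neg (by simp [hno])] at hy
        cases hy

theorem pvU_reverse_ne_of_mem (w : List (List Char)) (y : List Char) (hy : y ∈ w)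
    (hb : pvBlankB y = false) : pvU w.reverse ≠ [] := by
  intro hc
  have := (pvU_nil_iff _).mp hc y (List.mem_reverse.mpr hy)
  simp [hb] at this

-- trimmed prefix up to the last header = trimmed takeWhile prefix
theorem pvPT_take (m : List (List Char)) :
    pvT (m.take (match pvLastHdr m with | none => 0 | some k => k + 1)) =
      pvT (m.takeWhile pvNotOther) := by
  induction m with
  | nil => rfl
  | cons x t ih =>
    by_cases hb : pvBlankB x = true
    · have hno : pvNotOther x = true := by simp [pvNotOther, hb]
      cases hlh : pvLastHdr t with
      | none =>
        have hlh' : pvLastHdr (x :: t) = none := by simp [pvLastHdr, hb, hlh]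
        rw [hlh']
        simp only [List.take_zero]
        rw [List.takeWhile_cons, if_pos hno]
        rw [pvT_cons_all_blank x _ hb (pvLastHdr_none_all_blank t hlh)]
        rfl
      | some k =>
        have hlh' : pvLastHdr (x :: t) = some (k + 1) := by simp [pvLastHdr, hb, hlh]
        rw [hlh']
        simp only [List.take_succ_cons]
        rw [List.takeWhile_cons, if_pos hno]
        obtain ⟨hk, hv⟩ := pvLastHdr_spec t k hlh
        have hkt : k < t.length := lt_of_lt_of_le hk (List.takeWhile_prefix pvNotOther).length_le
        have htk : (t.takeWhile pvNotOther)[k] = t[k] :=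
          (List.takeWhile_prefix pvNotOther).getElem hk
        have hmem1 : t[k] ∈ t.take (k + 1) := by
          have : (t.take (k + 1))[k]'(by simp [hkt]) = t[k] := List.getElem_take
          exact this ▸ List.getElem_mem _
        have hmem2 : t[k] ∈ t.takeWhile pvNotOther := htk ▸ List.getElem_mem _
        have hvb : pvBlankB t[k] = false := htk ▸ hv
        rw [pvT_cons x _ (Or.inr (pvU_reverse_ne_of_mem _ _ hmem1 hvb)),
          pvT_cons x _ (Or.inr (pvU_reverse_ne_of_mem _ _ hmem2 hvb))]
        have := ih
        rw [hlh] at this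
        simpa using this
    · have hb' : pvBlankB x = false := by simpa using hb
      by_cases hh : pvHeaderB x = true
      · have hno : pvNotOther x = true := by simp [pvNotOther, hh]
        cases hlh : pvLastHdr t with
        | none =>
          have hlh' : pvLastHdr (x :: t) = some 0 := by simp [pvLastHdr, hb', hh, hlh]
          rw [hlh']
          simp only [Nat.zero_add, List.take_succ_cons, List.take_zero]
          rw [List.takeWhile_cons, if_pos hno]
          rw [pvT_cons x _ (Or.inl hb'), pvT_cons x _ (Or.inl hb')]
          rw [(pvT_nil_iff _).mpr (pvLastHdr_none_all_blank t hlh)]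
          rfl
        | some k =>
          have hlh' : pvLastHdr (x :: t) = some (k + 1) := by simp [pvLastHdr, hb', hh, hlh]
          rw [hlh']
          simp only [List.take_succ_cons]
          rw [List.takeWhile_cons, if_pos hno]
          rw [pvT_cons x _ (Or.inl hb'), pvT_cons x _ (Or.inl hb')]
          have := ih
          rw [hlh] at this
          simpa using this
      · have hh' : pvHeaderB x = false := by simpa using hh
        have hno : pvNotOther x = false := by simp [pvNotOther, hb', hh']
        have hlh' : pvLastHdr (x :: t) = none := by simp [pvLastHdr, hb', hh']
        rw [hlh']
        simp only [List.take_zero]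
        rw [List.takeWhile_cons, if_neg (by simp [hno])]

theorem pvTakeWhile_of_le (P : List Char → Bool) (l : List (List Char)) (s : Nat)
    (h : (l.takeWhile P).length < s) : (l.take s).takeWhile P = l.takeWhile P := by
  induction l generalizing s with
  | nil => simp
  | cons x t ih =>
    cases s with
    | zero => omega
    | succ s =>
      by_cases hp : P x = true
      · simp only [List.takeWhile_cons, hp, if_true, List.take_succ_cons] at h ⊢
        rw [ih s (by simpa using h)]
      · simp only [List.takeWhile_cons, hp] at h ⊢
        simp [show P x = false by simpa using hp]

-- proof-mirrors of the two ports' else-branches, applied to the common footer-stripped content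
def pvACore (content : List Char) : String :=
  let lines := PySem.Chars.splitOn content "\n".toList
  let headerLines := pvRevScanA lines.reverse []
  if headerLines == [] then pv_scan_header_from_top content
  else
    let headerLines := pvPopTrailA (pvPopLeadA headerLines.reverse)
    if headerLines ≠ [] then String.mk (PySem.Chars.join "\n".toList headerLines ++ "\n\n".toList)
    else ""

def pvBCore (content : List Char) : String :=
  let lines := PySem.Chars.splitOn content "\n".toList
  let start := (PySem.List.enumerate lines).foldl
    (fun s p => if !pvBlankB p.2 && !pvHeaderB p.2 then p.1 + 1 else s) 0
  let block := pvTrimB (PySem.List.slice lines (some start) none)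
  if block ≠ [] then String.mk (PySem.Chars.join "\n".toList block ++ "\n\n".toList)
  else
    let e := pvTopEndB (PySem.List.enumerate (PySem.List.slice lines none (some start))) 0
    let block := pvTrimB (PySem.List.slice lines none (some e))
    if block ≠ [] then String.mk (PySem.Chars.join "\n".toList block ++ "\n\n".toList)
    else ""

theorem pvTU_nil_iff (w : List (List Char)) :
    pvT (pvU w) = [] ↔ ∀ y ∈ w, pvBlankB y = true := by
  constructor
  · intro h y hy
    have hall := (pvT_nil_iff _).mp h
    rw [← List.takeWhile_append_dropWhile (p := pvBlankB) (l := w)] at hy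
    rcases List.mem_append.mp hy with hy | hy
    · exact List.mem_takeWhile_imp hy
    · exact hall y hy
  · intro h
    rw [(pvU_nil_iff w).mpr h]
    rfl

theorem pvTUT (z : List (List Char)) : pvT (pvU (pvT z)) = pvT (pvU z) := by
  rw [pvUT_comm, pvT_idem]

theorem pvTopEndB_none (t : List (List Char)) (h : pvLastHdr t = none) :
    pvTopEndB (PySem.List.enumerate t 0) 0 = 0 := by
  rw [pvTopEndB_spec, h]

theorem pvTopEndB_some (t : List (List Char)) (k : Nat) (h : pvLastHdr t = some k) :
    pvTopEndB (PySem.List.enumerate t 0) 0 = (k : Int) + 1 := by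
  rw [pvTopEndB_spec, h]
  push_cast
  ring

theorem pvCore_eq (content : List Char) : pvACore content = pvBCore content := by
  unfold pvACore pvBCore
  dsimp only
  set lines := PySem.Chars.splitOn content "\n".toList with hlines
  have hstart : ((PySem.List.enumerate lines).foldl
      (fun s p => if !pvBlankB p.2 && !pvHeaderB p.2 then p.1 + 1 else s) 0) = pvStart lines := rfl
  rw [pvRevScanA_nil, hstart]
  obtain ⟨h0, hle, hdrop, hlast⟩ := pvStart_spec lines
  set p := lines.reverse.takeWhile pvNotOther with hp
  rw [PySem.List.slice_from lines h0, hdrop, pvTrimB_eq]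
  have hblock : pvT (pvU p.reverse) = [] ↔ pvU p = [] := by
    rw [pvTU_nil_iff, pvU_nil_iff]
    constructor
    · intro h y hy; exact h y (List.mem_reverse.mpr hy)
    · intro h y hy; exact h y (List.mem_reverse.mp hy)
  by_cases hfb : pvU p = []
  · -- A falls back to the top scan; B's forward block is all blank, so B also takes its legacy branch
    rw [if_pos (by simpa using hfb), if_neg (by simp [hblock, hfb])]
    simp only [pv_scan_header_from_top]
    rw [← hlines]
    rw [pvTopScanA_eq, pvRevScanA_nil]
    set q := lines.takeWhile pvNotOther with hq
    rw [pvPopLeadA_eq, pvPopTrailA_eq, pvU_idem]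
    rw [PySem.List.slice_to lines h0]
    have hallp : ∀ y ∈ p, pvBlankB y = true := (pvU_nil_iff p).mp hfb
    by_cases hs0 : pvStart lines = 0
    · -- no non-blank non-header line at all: everything is blank here
      have hall : ∀ y ∈ lines, pvBlankB y = true := by
        intro y hy
        have : lines = p.reverse := by
          have := hdrop
          rw [hs0] at this
          simpa using this
        exact hallp y (List.mem_reverse.mp (this ▸ hy))
      have hq0 : pvU q = [] := (pvU_nil_iff q).mpr
        (fun y hy => hall y ((List.takeWhile_prefix pvNotOther).subset hy))
      rw [if_pos (by simpa using hq0)]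
      rw [hs0]
      simp only [Int.toNat_zero, List.take_zero]
      rw [pvTopEndB_none [] rfl]
      rw [show PySem.List.slice lines none (some (0:Int)) = lines.take (0:Int).toNat from
        PySem.List.slice_to lines (by omega)]
      simp only [Int.toNat_zero, List.take_zero]
      rw [pvTrimB_eq]
      simp [pvU, pvT]
    · -- the line just before `start` is an 'other' line, so the top scan never reaches past it
      have hqlt : q.length < (pvStart lines).toNat := by
        by_contra hge
        push_neg at hge
        obtain ⟨hidx, hval⟩ := hlast hs0
        have hidxq : (pvStart lines).toNat - 1 < q.length := by omega
        have hthis : pvNotOther (q[(pvStart lines).toNat - 1]'hidxq) = true :=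
          List.mem_takeWhile_imp (List.getElem_mem _)
        have hfalse : pvNotOther (q[(pvStart lines).toNat - 1]'hidxq) = false := by
          rw [(List.takeWhile_prefix pvNotOther).getElem hidxq]
          exact hval
        rw [hthis] at hfalse
        cases hfalse
      set m := lines.take (pvStart lines).toNat with hm
      have htw : m.takeWhile pvNotOther = q := pvTakeWhile_of_le pvNotOther lines _ hqlt
      cases hlh : pvLastHdr m with
      | none =>
        rw [pvTopEndB_none m hlh]
        have hq0 : pvU q = [] := (pvU_nil_iff q).mpr (by
          rw [← htw]
          exact pvLastHdr_none_all_blank m hlh)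
        rw [if_pos (by simpa using hq0)]
        rw [show PySem.List.slice lines none (some (0:Int)) = lines.take (0:Int).toNat from
          PySem.List.slice_to lines (by omega)]
        simp only [Int.toNat_zero, List.take_zero]
        rw [pvTrimB_eq]
        simp [pvU, pvT]
      | some k =>
        rw [pvTopEndB_some m k hlh]
        have hkq : k < q.length := by
          obtain ⟨hk, _⟩ := pvLastHdr_spec m k hlh
          rw [htw] at hk
          exact hk
        have hk1 : ((k : Int) + 1).toNat = k + 1 := by omega
        rw [show PySem.List.slice lines none (some ((k : Int) + 1)) =
            lines.take ((k : Int) + 1).toNat from PySem.List.slice_to lines (by omega)]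
        rw [hk1]
        have htake : lines.take (k + 1) = m.take (k + 1) := by
          rw [hm, List.take_take]
          congr 1
          omega
        rw [htake, pvTrimB_eq]
        have hb2 : pvT (pvU (m.take (k + 1))) = pvT (pvU q) := by
          calc pvT (pvU (m.take (k + 1))) = pvU (pvT (m.take (k + 1))) := (pvUT_comm _).symm
            _ = pvU (pvT (m.takeWhile pvNotOther)) := by
                  have := pvPT_take m
                  rw [hlh] at this
                  rw [this]
            _ = pvT (pvU (m.takeWhile pvNotOther)) := pvUT_comm _
            _ = pvT (pvU q) := by rw [htw]
        rw [hb2]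
        by_cases hq0 : pvU q = []
        · rw [if_pos (by simpa using hq0),
            if_neg (by simp only [ne_eq, not_not]; rw [hq0]; rfl)]
        · rw [if_neg (by simpa using hq0)]
  · -- both take the new-format branch, with the same trimmed block
    rw [if_neg (by simpa using hfb)]
    rw [pvPopLeadA_eq, pvPopTrailA_eq, ← pvT_of_pvU_reverse, pvTUT]
    have hne : pvT (pvU p.reverse) ≠ [] := by simp [hblock, hfb]
    rw [if_pos hne, if_pos hne]

-- ===== VERDICT (by name: the statement is the Claim_ definition above) =====
theorem extract_header_from_body_spec : Claim_equal_extract_header_from_body := by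
  intro body _
  show extract_header_from_body body = extract_header_from_body_alt body
  have hA : extract_header_from_body body = if (body.toList == []) = true then ""
      else pvACore (if (PySem.Chars.rfind body.toList "\n---\n".toList == -1) = true
        then body.toList
        else PySem.Chars.slice body.toList none
          (some (PySem.Chars.rfind body.toList "\n---\n".toList))) := rfl
  have hB : extract_header_from_body_alt body = if (body.toList == []) = true then ""
      else pvBCore (if (PySem.Chars.rfind body.toList "\n---\n".toList == -1) = true
        then body.toList
        else PySem.Chars.slice body.toList none
          (some (PySem.Chars.rfind body.toList "\n---\n".toList))) := rfl
  rw [hA, hB]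
  by_cases hcs : (body.toList == []) = true
  · rw [if_pos hcs, if_pos hcs]
  · rw [if_neg hcs, if_neg hcs, pvCore_eq]
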